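-- pv_equiv track=rewrite | github.com/blackjack534/AuESINet | module/SMILES_Transformer.py | _tokenize_smiles
-- ===== SOURCE A (Python) =====
-- def _tokenize_smiles(smiles):
--     """将SMILES字符串分解为tokens"""
--     tokens = []
--     i = 0
--     while i < len(smiles):
--         # 处理百分号开头的环编号 (如%10, %11)
--         if smiles[i] == '%' and i + 2 < len(smiles):
--             tokens.append(smiles[i:i+3])
--             i += 3
--         # 处理方括号中的原子
--         elif smiles[i] == '[':
--             bracket_end = smiles.find(']', i)
--             if bracket_end != -1:
--                 tokens.append(smiles[i:bracket_end+1])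
--                 i = bracket_end + 1
--             else:
--                 tokens.append(smiles[i])
--                 i += 1
--         # 处理其他字符
--         else:
--             tokens.append(smiles[i])
--             i += 1
--     return tokens
-- ===== SOURCE B (Python) =====
-- import re
--
-- _TOKEN_RE = re.compile(r'%..|\[.*?\]|.', re.DOTALL)
--
-- def _tokenize_smiles(smiles):
--     """将SMILES字符串分解为tokens (single regex pass)."""
--     return _TOKEN_RE.findall(smiles)
-- ===== Notes on version B (the rewrite author's own statement) =====
-- stated objective: idiomatic
-- what changed: Replaced the manual index loop with find/slice bookkeeping by a single precompiled regex pass (re.findall(r'%..|\[.*?\]|.', smiles, re.DOTALL)), whose alternation order reproduces the branch priority exactly.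
import Mathlib
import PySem

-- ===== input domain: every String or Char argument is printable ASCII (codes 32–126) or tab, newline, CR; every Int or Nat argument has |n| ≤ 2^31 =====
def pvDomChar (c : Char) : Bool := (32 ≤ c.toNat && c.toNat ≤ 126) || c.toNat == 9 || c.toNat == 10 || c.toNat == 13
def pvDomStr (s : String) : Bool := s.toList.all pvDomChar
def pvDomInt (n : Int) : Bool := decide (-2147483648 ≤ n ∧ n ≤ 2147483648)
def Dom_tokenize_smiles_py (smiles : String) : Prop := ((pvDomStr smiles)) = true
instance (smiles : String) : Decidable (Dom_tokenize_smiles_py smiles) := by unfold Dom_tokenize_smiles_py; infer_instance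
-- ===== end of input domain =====

-- B replaces A's manual index loop (with explicit find/slice bookkeeping) by a single regex pass,
-- re.findall(r'%..|\[.*?\]|.', smiles, re.DOTALL), whose alternation order reproduces A's branch priority (idiomatic).

-- ===== PORT A =====
-- while-loop of _tokenize_smiles: index i, accumulator tokens; fuel bounds the remaining iterations
def tokenizeLoop (cs : List Char) : Nat → Nat → List String → List String
  | 0, _, tokens => tokens
  | fuel + 1, i, tokens =>
    if h : i < cs.length then
      if cs[i] = '%' ∧ i + 2 < cs.length then
        tokenizeLoop cs fuel (i + 3)
          (tokens ++ [String.ofList (PySem.List.slice cs (some (i : Int)) (some ((i : Int) + 3)))])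
      else if cs[i] = '[' then
        -- bracket_end = smiles.find(']', i); '(bracketEnd + 1).toNat' is exact: the guard gives bracketEnd ≥ 0
        let bracketEnd := PySem.Chars.findFrom cs [']'] (i : Int)
        if bracketEnd ≠ -1 then
          tokenizeLoop cs fuel (bracketEnd + 1).toNat
            (tokens ++ [String.ofList (PySem.List.slice cs (some (i : Int)) (some (bracketEnd + 1)))])
        else
          tokenizeLoop cs fuel (i + 1) (tokens ++ [String.ofList [cs[i]]])
      else
        tokenizeLoop cs fuel (i + 1) (tokens ++ [String.ofList [cs[i]]])
    else tokens

def tokenize_smiles_py (smiles : String) : List String :=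
  tokenizeLoop smiles.toList smiles.toList.length 0 []

-- ===== PORT B =====
-- Hand port of re.findall(r'%..|\[.*?\]|.', s, re.DOTALL): at each position try the alternatives in
-- order ('%..' = '%' plus any two chars; '\[.*?\]' = '[' up to the FIRST ']', non-greedy, DOTALL; '.' = any
-- one char). It is exact here because '.' matches every character, so matches are contiguous from position 0.
def reFindallTok : List Char → List String
  | [] => []
  | c :: rest =>
    if c = '%' then
      match rest with
      | a :: b :: rest' => String.ofList ['%', a, b] :: reFindallTok rest'   -- '%..' matched
      | [a] => String.ofList [c] :: reFindallTok [a]                         -- too short: '.' matches '%'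
      | [] => [String.ofList [c]]
    else if c = '[' then
      match h : rest.dropWhile (· ≠ ']') with
      | ']' :: rest' =>                                                  -- '\[.*?\]' matched
          String.ofList ('[' :: (rest.takeWhile (· ≠ ']') ++ [']'])) :: reFindallTok rest'
      | _ => String.ofList [c] :: reFindallTok rest                          -- no ']': '.' matches '['
    else String.ofList [c] :: reFindallTok rest                              -- '.' matched
termination_by cs => cs.length
decreasing_by
  · simp; omega
  · simp
  · have hle := List.length_dropWhile_le (fun x => decide (x ≠ ']')) rest
    rw [h] at hle
    simp at hle ⊢
    omega
  · simp
  · simp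

def tokenize_smiles_py_alt (smiles : String) : List String :=
  reFindallTok smiles.toList

-- ===== PRECONDITION & SPEC =====
def Spec_tokenize_smiles_py (smiles : String) (out : List String) : Prop := out = tokenize_smiles_py_alt smiles
instance (smiles : String) (out : List String) : Decidable (Spec_tokenize_smiles_py smiles out) := by unfold Spec_tokenize_smiles_py; infer_instance

-- ===== CLAIM (what is proved, stated in full; the proofs are below) =====
def Claim_equal_tokenize_smiles_py : Prop := ∀ (smiles : String), Dom_tokenize_smiles_py smiles → Spec_tokenize_smiles_py smiles (tokenize_smiles_py smiles)

-- ===== LEMMAS AND PROOFS =====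

-- dropping takeWhile's length gives dropWhile
lemma tw_drop (s : List Char) (p : Char → Bool) : s.drop (s.takeWhile p).length = s.dropWhile p := by
  have h := List.takeWhile_append_dropWhile (p := p) (l := s)
  calc s.drop (s.takeWhile p).length
      = (s.takeWhile p ++ s.dropWhile p).drop (s.takeWhile p).length := by rw [h]
    _ = s.dropWhile p := List.drop_left

-- if c occurs in s, dropWhile (· ≠ c) starts with c
lemma dropWhile_of_mem (s : List Char) (c : Char) (hm : c ∈ s) :
    ∃ t, s.dropWhile (· ≠ c) = c :: t := by
  have hne : s.dropWhile (· ≠ c) ≠ [] := by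
    intro h0
    have := List.dropWhile_eq_nil_iff.mp h0 c hm
    simp at this
  obtain ⟨d, tail, hdt⟩ := List.exists_cons_of_ne_nil hne
  have hd : d = c := by
    have h1 := List.head?_dropWhile_not (fun x => decide (x ≠ c)) s
    rw [hdt] at h1
    simpa using h1
  exact ⟨tail, by rw [hdt, hd]⟩

-- Python's s.find(c) for a single character, characterised by takeWhile (proved from find_spec)
lemma find_singleton (s : List Char) (c : Char) :
    PySem.Chars.find s [c] = if c ∈ s then (((s.takeWhile (· ≠ c)).length : Nat) : Int) else -1 := by
  by_cases hm : c ∈ s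
  · rw [if_pos hm]
    set k := (s.takeWhile (· ≠ c)).length with hk
    have hkle : k ≤ s.length := by rw [hk]; exact (List.takeWhile_prefix _).length_le
    have hdw : s.drop k = s.dropWhile (· ≠ c) := tw_drop s _
    obtain ⟨tail, hdt⟩ := dropWhile_of_mem s c hm
    have hdropk : s.drop k = c :: tail := by rw [hdw, hdt]
    have hklt : k < s.length := by
      by_contra hx
      have h2 : s.drop k = [] := List.drop_eq_nil_of_le (by omega)
      rw [hdropk] at h2; exact List.cons_ne_nil _ _ h2
    have hpre : [c] <+: s.drop k := by rw [hdropk]; exact ⟨tail, rfl⟩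
    have hbefore : ∀ j (hj : j < k), s[j]'(by omega) ≠ c := by
      intro j hj
      have hpfx := List.takeWhile_prefix (l := s) (· ≠ c)
      have hEq : (s.takeWhile (· ≠ c))[j]'(by omega) = s[j]'(by omega) := hpfx.getElem _
      have hmem : (s.takeWhile (· ≠ c))[j]'(by omega) ∈ s.takeWhile (· ≠ c) := List.getElem_mem _
      have := List.mem_takeWhile_imp hmem
      rw [hEq] at this
      simpa using this
    have hinf : [c] <:+: s := (List.singleton_infix_iff c s).mpr hm
    have hfne : PySem.Chars.find s [c] ≠ -1 := (PySem.Chars.find_ne_neg_one_iff s [c]).mpr hinf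
    have hge : 0 ≤ PySem.Chars.find s [c] := by
      have := PySem.Chars.neg_one_le_find s [c]
      omega
    obtain ⟨hpf, hmin⟩ := PySem.Chars.find_spec hge
    set n := (PySem.Chars.find s [c]).toNat with hn
    have hnk : n = k := by
      rcases lt_trichotomy n k with h | h | h
      · exfalso
        have hnlt : n < s.length := by omega
        rw [List.drop_eq_getElem_cons hnlt, List.cons_prefix_cons] at hpf
        exact hbefore n h hpf.1.symm
      · exact h
      · exact absurd hpre (hmin k h)
    omega
  · rw [if_neg hm]
    exact (PySem.Chars.find_eq_neg_one_iff s [c]).mpr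
      (fun h => hm ((List.singleton_infix_iff c s).mp h))

-- unfolding equations for reFindallTok, one per regex alternative
lemma reTok_nil : reFindallTok [] = [] := by rw [reFindallTok]

lemma reTok_pct (a b : Char) (rest' : List Char) :
    reFindallTok ('%' :: a :: b :: rest') = String.ofList ['%', a, b] :: reFindallTok rest' := by
  rw [reFindallTok]
  simp

lemma reTok_pct_one (a : Char) : reFindallTok ['%', a] = String.ofList ['%'] :: reFindallTok [a] := by
  rw [reFindallTok]
  simp

lemma reTok_pct_nil : reFindallTok ['%'] = [String.ofList ['%']] := by
  rw [reFindallTok]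
  simp

lemma reTok_bra (rest rest' : List Char) (h : rest.dropWhile (· ≠ ']') = ']' :: rest') :
    reFindallTok ('[' :: rest) =
      String.ofList ('[' :: (rest.takeWhile (· ≠ ']') ++ [']'])) :: reFindallTok rest' := by
  rw [reFindallTok.eq_def]
  simp
  split
  · next rest'' heq =>
      rw [h] at heq
      injection heq with _ h2
      rw [h2]
  · next hne =>
      exact (hne _ h).elim

lemma reTok_bra_none (rest : List Char) (h : rest.dropWhile (· ≠ ']') = []) :
    reFindallTok ('[' :: rest) = String.ofList ['['] :: reFindallTok rest := by
  rw [reFindallTok.eq_def]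
  simp
  split
  · next rest'' heq =>
      rw [h] at heq
      exact absurd heq (List.cons_ne_nil _ _).symm
  · rfl

lemma reTok_other (c : Char) (rest : List Char) (h1 : c ≠ '%') (h2 : c ≠ '[') :
    reFindallTok (c :: rest) = String.ofList [c] :: reFindallTok rest := by
  rw [reFindallTok.eq_def]
  simp [h1, h2]

-- the loop of A computes, from position i, exactly B's tokens of the remaining suffix
lemma loop_eq (cs : List Char) : ∀ fuel i tokens, i ≤ cs.length → cs.length - i ≤ fuel →
    tokenizeLoop cs fuel i tokens = tokens ++ reFindallTok (cs.drop i) := by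
  intro fuel
  induction fuel with
  | zero =>
    intro i tokens hle hf
    have : i = cs.length := by omega
    subst this
    simp [tokenizeLoop, reTok_nil]
  | succ fuel ih =>
    intro i tokens hle hf
    by_cases h : i < cs.length
    · have hd : cs.drop i = cs[i] :: cs.drop (i + 1) := List.drop_eq_getElem_cons h
      rw [tokenizeLoop, dif_pos h]
      by_cases hpct : cs[i] = '%' ∧ i + 2 < cs.length
      · obtain ⟨hc, hlt⟩ := hpct
        rw [if_pos ⟨hc, hlt⟩]
        have h1 : i + 1 < cs.length := by omega
        have h2 : i + 2 < cs.length := hlt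
        have hd1 : cs.drop (i + 1) = cs[i + 1] :: cs.drop (i + 2) := List.drop_eq_getElem_cons h1
        have hd2 : cs.drop (i + 2) = cs[i + 2] :: cs.drop (i + 3) := List.drop_eq_getElem_cons h2
        have hsl : PySem.List.slice cs (some (i : Int)) (some ((i : Int) + 3)) =
            [cs[i], cs[i + 1], cs[i + 2]] := by
          have hcast : ((i : Int) + 3) = ((i + 3 : Nat) : Int) := by push_cast; ring
          rw [hcast, PySem.List.slice_natCast]
          have : i + 3 - i = 3 := by omega
          rw [this, hd, hd1, hd2]
          rfl
        rw [hsl, ih (i + 3) _ (by omega) (by omega), hd, hd1, hd2, hc,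
          reTok_pct cs[i + 1] cs[i + 2] (cs.drop (i + 3))]
        simp
      · rw [if_neg hpct]
        by_cases hb : cs[i] = '['
        · rw [if_pos hb]
          have hff := PySem.Chars.findFrom_natCast cs [']'] i (by omega)
          have hfs := find_singleton (cs.drop i) ']'
          by_cases hmem : ']' ∈ cs.drop (i + 1)
          · -- a closing bracket exists after position i ('[' itself is not ']')
            set rest := cs.drop (i + 1) with hrest
            set pre := rest.takeWhile (· ≠ ']') with hpre
            set k := pre.length with hk
            obtain ⟨rest', hdw⟩ := dropWhile_of_mem rest ']' hmem
            have hsplit : rest = pre ++ ']' :: rest' := by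
              conv_lhs => rw [← List.takeWhile_append_dropWhile (p := (· ≠ ']')) (l := rest)]
              rw [hdw]
            have hmem' : ']' ∈ cs.drop i := by rw [hd]; right; exact hmem
            have htw : (cs.drop i).takeWhile (· ≠ ']') = cs[i] :: pre := by
              rw [hd, List.takeWhile_cons_of_pos (by simp [hb])]
            have hfind : PySem.Chars.find (cs.drop i) [']'] = ((k + 1 : Nat) : Int) := by
              rw [hfs, if_pos hmem', htw]
              simp [hk]
            have hbe : PySem.Chars.findFrom cs [']'] (i : Int) = ((i + k + 1 : Nat) : Int) := by
              rw [hff, hfind]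
              rw [if_neg (by omega)]
              push_cast
              ring
            rw [hbe, if_pos (by omega)]
            have hrlen : k + 1 ≤ rest.length := by
              rw [hsplit]
              simp only [List.length_append, List.length_cons, hk]
              omega
            have hlen : i + k + 2 ≤ cs.length := by
              have : rest.length = cs.length - (i + 1) := by rw [hrest]; simp
              omega
            have htn : ((((i + k + 1 : Nat) : Int)) + 1).toNat = i + k + 2 := by omega
            have hsl : PySem.List.slice cs (some (i : Int)) (some (((i + k + 1 : Nat) : Int) + 1)) =
                cs[i] :: (pre ++ [']']) := by
              have hcast : (((i + k + 1 : Nat) : Int) + 1) = ((i + k + 2 : Nat) : Int) := by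
                push_cast; ring
              rw [hcast, PySem.List.slice_natCast]
              have h3 : i + k + 2 - i = k + 2 := by omega
              rw [h3, hd, hsplit, List.take_succ_cons]
              congr 1
              have h4 : k + 1 = pre.length + 1 := by rw [hk]
              rw [h4, List.take_length_add_append, List.take_succ_cons, List.take_zero]
            have hdrop2 : cs.drop (i + k + 2) = rest' := by
              have : cs.drop (i + k + 2) = rest.drop (k + 1) := by
                rw [hrest, List.drop_drop]
                congr 1
                omega
              rw [this, hsplit]
              have h4 : k + 1 = pre.length + 1 := by rw [hk]
              rw [h4, List.drop_length_add_append, List.drop_succ_cons, List.drop_zero]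
            rw [htn, hsl, ih (i + k + 2) _ (by omega) (by omega), hdrop2, hd, hb,
              reTok_bra rest rest' hdw]
            simp [hpre]
          · -- no closing bracket: '[' becomes a single-character token
            have hnm : ']' ∉ cs.drop i := by
              rw [hd]
              intro hx
              rcases List.mem_cons.mp hx with hx | hx
              · rw [hb] at hx; exact absurd hx.symm (by decide)
              · exact hmem hx
            have hfind : PySem.Chars.find (cs.drop i) [']'] = -1 := by
              rw [hfs, if_neg hnm]
            have hbe : PySem.Chars.findFrom cs [']'] (i : Int) = -1 := by
              rw [hff, hfind]
              simp
            rw [hbe, if_neg (by simp)]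
            have hdw0 : (cs.drop (i + 1)).dropWhile (· ≠ ']') = [] := by
              rw [List.dropWhile_eq_nil_iff]
              intro x hx
              simp
              intro hxe
              exact hmem (hxe ▸ hx)
            rw [ih (i + 1) _ (by omega) (by omega), hd, hb,
              reTok_bra_none (cs.drop (i + 1)) hdw0]
            simp
        · rw [if_neg hb]
          rw [ih (i + 1) _ (by omega) (by omega), hd]
          by_cases hp : cs[i] = '%'
          · -- '%' with fewer than two following characters: '.' matches it
            have hlen : (cs.drop (i + 1)).length ≤ 1 := by
              have : ¬ i + 2 < cs.length := fun hx => hpct ⟨hp, hx⟩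
              simp
              omega
            rw [hp]
            rcases hrest : cs.drop (i + 1) with _ | ⟨a, t⟩
            · rw [reTok_pct_nil]
              simp [reTok_nil]
            · have ht : t = [] := by
                rw [hrest] at hlen
                simpa using hlen
              subst ht
              rw [reTok_pct_one]
              simp
          · rw [reTok_other cs[i] (cs.drop (i + 1)) hp hb]
            simp
    · have : i = cs.length := by omega
      subst this
      rw [tokenizeLoop, dif_neg h]
      simp [reTok_nil]

-- ===== VERDICT (by name: the statement is the Claim_ definition above) =====
theorem tokenize_smiles_py_spec : Claim_equal_tokenize_smiles_py := by
  intro smiles _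
  unfold Spec_tokenize_smiles_py tokenize_smiles_py tokenize_smiles_py_alt
  simpa using loop_eq smiles.toList smiles.toList.length 0 [] (by omega) (by omega)
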